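-- pv_equiv track=rewrite | github.com/rbhargav01/Ekanek_backend | k_cheapest_flights.py | k_cheap_flights
-- ===== SOURCE A (Python) =====
-- import heapq
--
-- def k_cheap_flights(delhi_to_mumbai,mumbai_to_delhi,k):
--
--     #If the given arrays are already sorted then the sorting functions are not necessary and the time complexity becomes = O(klog(k))
--
--     delhi_to_mumbai.sort()                                                              #Sorting the given list of fares
--     mumbai_to_delhi.sort()
--     heap=[]
--     heap.append([delhi_to_mumbai[0]+mumbai_to_delhi[0],0,0])                            #Appending the cheapest fares to the heap with the indexes of 1st array and the indexes of the second array
--     ans=[]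
--     i1=0
--     while(len(heap)>0 and i1<k):
--         cur=heapq.heappop(heap)                                                         #Retrieving the cheapest sum pair
--         i=cur[1]                                                                        #Retrieving the index of Delhi to Mumbai flight as i
--         j=cur[2]                                                                        #Retrieving the index of Mumbai to Delhi flight as j
--         if(i<len(delhi_to_mumbai)-1):
--             heapq.heappush(heap,[delhi_to_mumbai[i+1]+mumbai_to_delhi[j],i+1,j])        #Adding the (i+1,j)th element to the heap
--         if(j<len(mumbai_to_delhi)-1):
--             heapq.heappush(heap,[delhi_to_mumbai[i]+mumbai_to_delhi[j+1],i,j+1])        #Adding the (i,j+1)th element to the heap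
--         if(len(ans)>0 and [delhi_to_mumbai[i],mumbai_to_delhi[j]]==ans[-1]):            #To avoid repeatition of the same elements
--             continue
--         ans.append([delhi_to_mumbai[i],mumbai_to_delhi[j]])                             #Adding the pair to the ans array
--         i1+=1
--     return ans
-- ===== SOURCE B (Python) =====
-- def k_cheap_flights(delhi_to_mumbai, mumbai_to_delhi, k):
--     delhi_to_mumbai.sort()
--     mumbai_to_delhi.sort()
--     triples = sorted((d + m, i, j)
--                      for i, d in enumerate(delhi_to_mumbai)
--                      for j, m in enumerate(mumbai_to_delhi))
--     ans = []
--     for s, i, j in triples: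
--         if len(ans) >= k:
--             break
--         pair = [delhi_to_mumbai[i], mumbai_to_delhi[j]]
--         if not ans or ans[-1] != pair:
--             ans.append(pair)
--     return ans
-- ===== Notes on version B (the rewrite author's own statement) =====
-- stated objective: simpler
-- what changed: Replaces the heapq best-first frontier (push/pop of (sum,i,j) candidates with duplicate entries) by building all (sum,i,j) triples once, sorting them, and doing a single adjacent-dedup scan that stops after k pairs.
import Mathlib
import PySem

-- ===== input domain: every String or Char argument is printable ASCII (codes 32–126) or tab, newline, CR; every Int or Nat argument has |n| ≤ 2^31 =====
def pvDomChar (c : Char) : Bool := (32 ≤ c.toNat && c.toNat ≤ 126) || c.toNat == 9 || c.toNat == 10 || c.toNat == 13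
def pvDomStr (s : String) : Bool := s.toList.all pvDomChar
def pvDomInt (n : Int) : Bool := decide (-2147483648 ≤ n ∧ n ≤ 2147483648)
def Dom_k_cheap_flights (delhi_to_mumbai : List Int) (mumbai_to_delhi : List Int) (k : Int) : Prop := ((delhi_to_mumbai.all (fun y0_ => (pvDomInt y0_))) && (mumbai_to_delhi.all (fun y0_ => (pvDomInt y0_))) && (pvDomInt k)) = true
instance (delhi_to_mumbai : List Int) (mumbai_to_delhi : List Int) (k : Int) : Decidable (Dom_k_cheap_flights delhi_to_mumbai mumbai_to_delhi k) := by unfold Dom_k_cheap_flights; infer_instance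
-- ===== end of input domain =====

-- B replaces A's heap-driven best-first frontier by "sort all (sum,i,j) triples once, then one dedup scan";
-- equivalence is about the RETURN value only (Python A sorts both argument lists in place, and Python B performs the same two in-place sorts).

-- ===== PORT A =====
-- keyOf reads a triple in the order Python's heapq/sorted compare the 3-element lists/tuples [sum, i, j]:
-- lexicographically — exactly the lexicographic order ×ₗ on Int triples.
def keyOf (x : Int × Int × Int) : Int ×ₗ (Int ×ₗ Int) := toLex (x.1, toLex (x.2.1, x.2.2))

-- heapq model: the heap is kept as a lexicographically sorted list; heappush = ordered insert, heappop = take the head.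
-- This is exact for the observable pop sequence: heappop returns a minimal element, and equal elements are identical triples here.
def hpush (h : List (Int × Int × Int)) (x : Int × Int × Int) : List (Int × Int × Int) :=
  match h with
  | [] => [x]
  | y :: t => if keyOf x ≤ keyOf y then x :: y :: t else y :: hpush t x

-- the while loop of A (heap, ans, i1 are the loop state)
def loopA (ds ms : List Int) (k : Int) (fuel : Nat) (heap : List (Int × Int × Int)) (ans : List (List Int)) (i1 : Int) :
    List (List Int) :=
  match fuel, heap with
  | _, [] => ans
  | 0, _ :: _ => ans     -- fuel exhausted: unreachable, the caller passes fuel ≥ the loop's iteration count (proved below)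
  | Nat.succ fuel, cur :: rest =>
    if i1 < k then
      let i := cur.2.1
      let j := cur.2.2
      let h1 := if i < (ds.length : Int) - 1 then hpush rest (PySem.List.pyGetD ds (i + 1) 0 + PySem.List.pyGetD ms j 0, i + 1, j) else rest
      let h2 := if j < (ms.length : Int) - 1 then hpush h1 (PySem.List.pyGetD ds i 0 + PySem.List.pyGetD ms (j + 1) 0, i, j + 1) else h1
      let pair := [PySem.List.pyGetD ds i 0, PySem.List.pyGetD ms j 0]
      if ans.length > 0 ∧ ans.getLast? = some pair then
        loopA ds ms k fuel h2 ans i1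
      else
        loopA ds ms k fuel h2 (ans ++ [pair]) (i1 + 1)
    else ans

def k_cheap_flights (delhi_to_mumbai : List Int) (mumbai_to_delhi : List Int) (k : Int) : List (List Int) :=
  let ds := PySem.List.sorted delhi_to_mumbai (fun x => x)
  let ms := PySem.List.sorted mumbai_to_delhi (fun x => x)
  -- delhi_to_mumbai[0] / mumbai_to_delhi[0]: IndexError on an empty list — those inputs are excluded by Pre_
  let heap := [(PySem.List.pyGetD ds 0 0 + PySem.List.pyGetD ms 0 0, (0 : Int), (0 : Int))]
  loopA ds ms k (3 ^ (ds.length + ms.length)) heap [] 0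

-- ===== PORT B =====
-- the scan of B: walk the sorted triples, appending each pair unless it repeats the previous one, until k pairs
def scanB (ds ms : List Int) (k : Int) (ts : List (Int × Int × Int)) (ans : List (List Int)) : List (List Int) :=
  match ts with
  | [] => ans
  | t :: rest =>
    if (ans.length : Int) ≥ k then ans
    else
      let pair := [PySem.List.pyGetD ds t.2.1 0, PySem.List.pyGetD ms t.2.2 0]
      if ans = [] ∨ ¬ ans.getLast? = some pair then scanB ds ms k rest (ans ++ [pair])
      else scanB ds ms k rest ans

def k_cheap_flights_alt (delhi_to_mumbai : List Int) (mumbai_to_delhi : List Int) (k : Int) : List (List Int) :=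
  let ds := PySem.List.sorted delhi_to_mumbai (fun x => x)
  let ms := PySem.List.sorted mumbai_to_delhi (fun x => x)
  let raw := (PySem.List.enumerate ds).flatMap (fun p => (PySem.List.enumerate ms).map (fun q => (p.2 + q.2, p.1, q.1)))
  -- Python sorts the tuples (sum, i, j) with no key: tuple comparison is lexicographic = the lexicographic `<` on the 3-element key list
  scanB ds ms k (PySem.List.sorted raw keyOf) []

-- ===== PRECONDITION & SPEC =====
-- Pre_ excludes exactly the inputs on which Python A raises: with an empty delhi_to_mumbai or mumbai_to_delhi,
-- the unconditional delhi_to_mumbai[0] + mumbai_to_delhi[0] is an IndexError (even for k <= 0).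
def Pre_k_cheap_flights (delhi_to_mumbai : List Int) (mumbai_to_delhi : List Int) (k : Int) : Prop :=
  delhi_to_mumbai ≠ [] ∧ mumbai_to_delhi ≠ []
instance (delhi_to_mumbai : List Int) (mumbai_to_delhi : List Int) (k : Int) : Decidable (Pre_k_cheap_flights delhi_to_mumbai mumbai_to_delhi k) := by unfold Pre_k_cheap_flights; infer_instance
def pvWitness_k_cheap_flights : List Int × List Int × Int := ([7, 1, 3], [2, 2], 4)

def Spec_k_cheap_flights (delhi_to_mumbai : List Int) (mumbai_to_delhi : List Int) (k : Int) (out : List (List Int)) : Prop := out = k_cheap_flights_alt delhi_to_mumbai mumbai_to_delhi k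
instance (delhi_to_mumbai : List Int) (mumbai_to_delhi : List Int) (k : Int) (out : List (List Int)) : Decidable (Spec_k_cheap_flights delhi_to_mumbai mumbai_to_delhi k out) := by unfold Spec_k_cheap_flights; infer_instance

-- ===== CLAIM (what is proved, stated in full; the proofs are below) =====
def Claim_equal_k_cheap_flights : Prop := ∀ (delhi_to_mumbai : List Int) (mumbai_to_delhi : List Int) (k : Int), Dom_k_cheap_flights delhi_to_mumbai mumbai_to_delhi k → Pre_k_cheap_flights delhi_to_mumbai mumbai_to_delhi k → Spec_k_cheap_flights delhi_to_mumbai mumbai_to_delhi k (k_cheap_flights delhi_to_mumbai mumbai_to_delhi k)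
-- ===== LEMMAS AND PROOFS =====

-- strict lexicographic order on the triples (= Python's comparison of the 3-element lists/tuples)
def tLt (a b : Int × Int × Int) : Prop := keyOf a < keyOf b
def hLe (a b : Int × Int × Int) : Prop := tLt a b ∨ a = b
-- the (i,j)-th triple of the sorted fare lists
def trip (ds ms : List Int) (i j : Nat) : Int × Int × Int := (ds.getD i 0 + ms.getD j 0, (i : Int), (j : Int))
-- the pair of fares both programs append for a popped/scanned triple
def pairOf (ds ms : List Int) (x : Int × Int × Int) : List Int := [PySem.List.pyGetD ds x.2.1 0, PySem.List.pyGetD ms x.2.2 0]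
def isSucc (p c : Int × Int × Int) : Prop := (c.2.1 = p.2.1 + 1 ∧ c.2.2 = p.2.2) ∨ (c.2.1 = p.2.1 ∧ c.2.2 = p.2.2 + 1)
-- "c can be in the heap after the first t triples of L have been popped"
def pushable (L : List (Int × Int × Int)) (t : Nat) (c : Int × Int × Int) : Prop :=
  (c.2.1 = 0 ∧ c.2.2 = 0) ∨ ∃ p ∈ L.take t, isSucc p c

lemma keyOf_inj {a b : Int × Int × Int} (h : keyOf a = keyOf b) : a = b := by
  obtain ⟨a1, a2, a3⟩ := a; obtain ⟨b1, b2, b3⟩ := b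
  simp only [keyOf, toLex_inj, Prod.mk.injEq] at h
  simp [h.1, h.2.1, h.2.2]

lemma lexLt_iff {a b : Int ×ₗ (Int ×ₗ Int)} :
    a < b ↔ (a.1 < b.1 ∨ (a.1 = b.1 ∧ (a.2.1 < b.2.1 ∨ (a.2.1 = b.2.1 ∧ a.2.2 < b.2.2)))) := by
  rw [Prod.Lex.lt_iff]
  constructor
  · rintro (h | ⟨h1, h2⟩)
    · exact Or.inl h
    · rw [Prod.Lex.lt_iff] at h2; right; exact ⟨h1, h2⟩
  · rintro (h | ⟨h1, h2⟩)
    · exact Or.inl h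
    · right; exact ⟨h1, Prod.Lex.lt_iff.mpr h2⟩

-- termination measure for A's while loop: a pop at (i,j) removes weight 3^((n-1-i)+(m-1-j)) and pushes at most
-- 2 * 3^(that exponent - 1), so the total weight of the heap strictly decreases.
def wt (nn mm : Int) (x : Int × Int × Int) : Nat := 3 ^ ((nn - 1 - x.2.1).toNat + (mm - 1 - x.2.2).toNat)

lemma wsum_hpush (f : (Int × Int × Int) → Nat) (h : List (Int × Int × Int)) (x : Int × Int × Int) :
    ((hpush h x).map f).sum = f x + (h.map f).sum := by
  induction h with
  | nil => simp [hpush]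
  | cons y t ih => simp only [hpush]; split <;> simp [ih] <;> omega

lemma step_measure (nn mm : Int) (cur : Int × Int × Int) (rest : List (Int × Int × Int)) (s1 s2 : Int) :
    ((if cur.2.2 < mm - 1
        then hpush (if cur.2.1 < nn - 1 then hpush rest (s1, cur.2.1 + 1, cur.2.2) else rest) (s2, cur.2.1, cur.2.2 + 1)
        else (if cur.2.1 < nn - 1 then hpush rest (s1, cur.2.1 + 1, cur.2.2) else rest)).map (wt nn mm)).sum
      < ((cur :: rest).map (wt nn mm)).sum := by
  have hpos : ∀ e : Nat, 0 < 3 ^ e := fun e => Nat.pow_pos (by norm_num)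
  have hmono : ∀ e f : Nat, e < f → 3 ^ e < 3 ^ f := fun e f h => Nat.pow_lt_pow_right (by norm_num) h
  simp only [List.map_cons, List.sum_cons]
  split_ifs with h2 h1 h1 <;> simp only [wsum_hpush, wt]
  · -- both pushes
    have e1 : (nn - 1 - (cur.2.1 + 1)).toNat = (nn - 1 - cur.2.1).toNat - 1 := by omega
    have e2 : (mm - 1 - (cur.2.2 + 1)).toNat = (mm - 1 - cur.2.2).toNat - 1 := by omega
    have hA : 1 ≤ (nn - 1 - cur.2.1).toNat := by omega
    have hB : 1 ≤ (mm - 1 - cur.2.2).toNat := by omega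
    rw [e1, e2]
    generalize (nn - 1 - cur.2.1).toNat = A at *
    generalize (mm - 1 - cur.2.2).toNat = B at *
    obtain ⟨C, e3, g1, g2⟩ : ∃ C, A + B = C + 1 ∧ A + (B - 1) = C ∧ A - 1 + B = C :=
      ⟨A + B - 1, by omega, by omega, by omega⟩
    rw [g1, g2, e3, pow_succ]
    have := hpos C
    omega
  · -- only the j+1 push
    have h := hmono ((nn - 1 - cur.2.1).toNat + (mm - 1 - (cur.2.2 + 1)).toNat)
      ((nn - 1 - cur.2.1).toNat + (mm - 1 - cur.2.2).toNat) (by omega)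
    omega
  · -- only the i+1 push
    have h := hmono ((nn - 1 - (cur.2.1 + 1)).toNat + (mm - 1 - cur.2.2).toNat)
      ((nn - 1 - cur.2.1).toNat + (mm - 1 - cur.2.2).toNat) (by omega)
    omega
  · have := hpos ((nn - 1 - cur.2.1).toNat + (mm - 1 - cur.2.2).toNat)
    omega

lemma tLt_irrefl (a : Int × Int × Int) : ¬ tLt a a := lt_irrefl _

lemma tLt_trans {a b c : Int × Int × Int} (h1 : tLt a b) (h2 : tLt b c) : tLt a c := lt_trans h1 h2

lemma tLt_asymm {a b : Int × Int × Int} (h : tLt a b) : ¬ tLt b a :=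
  fun h' => tLt_irrefl a (tLt_trans h h')

lemma hLe_of_key_le {a b : Int × Int × Int} (h : keyOf a ≤ keyOf b) : hLe a b :=
  (lt_or_eq_of_le h).imp id keyOf_inj

lemma tLt_of_not_key_le {a b : Int × Int × Int} (h : ¬ keyOf a ≤ keyOf b) : tLt b a := not_le.mp h

lemma hLe_trans {a b c : Int × Int × Int} (h1 : hLe a b) (h2 : hLe b c) : hLe a c := by
  rcases h1 with h1 | rfl
  · rcases h2 with h2 | rfl
    · exact Or.inl (tLt_trans h1 h2)
    · exact Or.inl h1
  · exact h2

lemma mem_hpush {h : List (Int × Int × Int)} {x y : Int × Int × Int} :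
    y ∈ hpush h x ↔ y = x ∨ y ∈ h := by
  induction h with
  | nil => simp [hpush]
  | cons z t ih =>
    simp only [hpush]
    split
    · simp
    · simp only [List.mem_cons, ih]; tauto

lemma pairwise_hpush {h : List (Int × Int × Int)} {x : Int × Int × Int}
    (hp : h.Pairwise hLe) : (hpush h x).Pairwise hLe := by
  induction h with
  | nil => simp [hpush]
  | cons y t ih =>
    obtain ⟨hy, ht⟩ := List.pairwise_cons.mp hp
    simp only [hpush]
    split
    · rename_i hkey
      refine List.Pairwise.cons ?_ hp
      intro z hz
      rcases List.mem_cons.mp hz with rfl | hz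
      · exact hLe_of_key_le hkey
      · exact hLe_trans (hLe_of_key_le hkey) (hy z hz)
    · rename_i hkey
      refine List.Pairwise.cons ?_ (ih ht)
      intro z hz
      rcases mem_hpush.mp hz with rfl | hz
      · exact Or.inl (tLt_of_not_key_le hkey)
      · exact hy z hz

lemma mono_getD {xs : List Int} (h : xs.Pairwise (· ≤ ·)) :
    ∀ a b : Nat, a ≤ b → b < xs.length → xs.getD a 0 ≤ xs.getD b 0 := by
  intro a b hab hb
  rcases Nat.eq_or_lt_of_le hab with rfl | hlt
  · exact le_refl _
  · have hp := List.pairwise_iff_getElem.mp h a b (lt_trans hlt hb) hb hlt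
    rw [List.getD_eq_getElem _ _ (lt_trans hlt hb), List.getD_eq_getElem _ _ hb]
    exact hp

lemma tLt_trip {ds ms : List Int}
    (hmd : ∀ a b : Nat, a ≤ b → b < ds.length → ds.getD a 0 ≤ ds.getD b 0)
    (hmm : ∀ a b : Nat, a ≤ b → b < ms.length → ms.getD a 0 ≤ ms.getD b 0)
    {i j i' j' : Nat} (hii : i ≤ i') (hjj : j ≤ j') (hne : i ≠ i' ∨ j ≠ j')
    (hi' : i' < ds.length) (hj' : j' < ms.length) :
    tLt (trip ds ms i j) (trip ds ms i' j') := by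
  have h1 : ds.getD i 0 ≤ ds.getD i' 0 := hmd i i' hii hi'
  have h2 : ms.getD j 0 ≤ ms.getD j' 0 := hmm j j' hjj hj'
  unfold tLt keyOf trip
  rw [lexLt_iff]
  rcases eq_or_lt_of_le (add_le_add h1 h2) with he | hl
  · refine Or.inr ⟨he, ?_⟩
    show (i : Int) < (i' : Int) ∨ ((i : Int) = (i' : Int) ∧ (j : Int) < (j' : Int))
    omega
  · exact Or.inl hl

lemma index_lt_of_tLt {L : List (Int × Int × Int)} (hLs : L.Pairwise tLt) {a b : Nat}
    (ha : a < L.length) (hb : b < L.length) (h : tLt L[a] L[b]) : a < b := by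
  by_contra hc
  have hc' : b ≤ a := Nat.le_of_not_lt hc
  rcases Nat.eq_or_lt_of_le hc' with rfl | hlt
  · exact tLt_irrefl _ h
  · exact tLt_asymm (List.pairwise_iff_getElem.mp hLs b a hb ha hlt) h

lemma mem_drop_succ_of_tLt {L : List (Int × Int × Int)} (hLs : L.Pairwise tLt) {t : Nat} {x : Int × Int × Int}
    (ht : t < L.length) (hx : x ∈ L) (hlt : tLt L[t] x) : x ∈ L.drop (t + 1) := by
  obtain ⟨a, ha, rfl⟩ := List.mem_iff_getElem.mp hx
  have hta : t < a := index_lt_of_tLt hLs ht ha hlt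
  rw [List.mem_drop_iff_getElem]
  refine ⟨a - (t + 1), by omega, ?_⟩
  congr 1
  omega

lemma mem_take_of_tLt {L : List (Int × Int × Int)} (hLs : L.Pairwise tLt) {t : Nat} {x : Int × Int × Int}
    (ht : t < L.length) (hx : x ∈ L) (hlt : tLt x L[t]) : x ∈ L.take t := by
  obtain ⟨a, ha, rfl⟩ := List.mem_iff_getElem.mp hx
  have hta : a < t := index_lt_of_tLt hLs ha ht hlt
  rw [List.mem_take_iff_getElem]
  exact ⟨a, by omega, rfl⟩

lemma eq_or_tLt_of_mem_drop {L : List (Int × Int × Int)} (hLs : L.Pairwise tLt) {t : Nat} {x : Int × Int × Int}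
    (ht : t < L.length) (hx : x ∈ L.drop t) : x = L[t] ∨ tLt L[t] x := by
  obtain ⟨a, ha, he⟩ := List.mem_drop_iff_getElem.mp hx
  rcases Nat.eq_zero_or_pos a with rfl | hpos
  · left; simpa using he.symm
  · right
    rw [← he]
    exact List.pairwise_iff_getElem.mp hLs t (t + a) ht (by omega) (by omega)

lemma nodup_of_pairwise_tLt {L : List (Int × Int × Int)} (hLs : L.Pairwise tLt) : L.Nodup :=
  hLs.imp fun hab => fun he => tLt_irrefl _ (he ▸ hab)

lemma not_mem_take_drop {L : List (Int × Int × Int)} (hLs : L.Pairwise tLt) {t : Nat} {x : Int × Int × Int}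
    (h1 : x ∈ L.take t) (h2 : x ∈ L.drop t) : False := by
  have hnd := nodup_of_pairwise_tLt hLs
  rw [← List.take_append_drop t L] at hnd
  exact (List.nodup_append.mp hnd).2.2 x h1 x h2 rfl

lemma mem_enumerate {α : Type} {xs : List α} {s : Int} {p : Int × α} :
    p ∈ PySem.List.enumerate xs s ↔ ∃ n : Nat, ∃ _h : n < xs.length, p = (s + n, xs[n]) := by
  induction xs generalizing s with
  | nil => simp [PySem.List.enumerate_nil]
  | cons x xs ih =>
    rw [PySem.List.enumerate_cons]
    simp only [List.mem_cons, ih]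
    constructor
    · rintro (rfl | ⟨n, hn, rfl⟩)
      · exact ⟨0, by simp, by simp⟩
      · refine ⟨n + 1, by simpa using hn, ?_⟩
        simp only [List.getElem_cons_succ]
        congr 1
        push_cast
        ring
    · rintro ⟨n, hn, rfl⟩
      cases n with
      | zero => left; simp
      | succ n =>
        right
        refine ⟨n, by simpa using hn, ?_⟩
        simp only [List.getElem_cons_succ]
        congr 1
        push_cast
        ring

lemma nodup_enumerate {α : Type} (xs : List α) (s : Int) : (PySem.List.enumerate xs s).Nodup :=
  List.Nodup.of_map (fun x => x.1)
    (by rw [PySem.List.map_fst_enumerate]; exact PySem.List.nodup_pyRange_one _ _)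

lemma enumerate_fst_inj {α : Type} {xs : List α} {s : Int} {p q : Int × α}
    (hp : p ∈ PySem.List.enumerate xs s) (hq : q ∈ PySem.List.enumerate xs s) (h : p.1 = q.1) :
    p = q := by
  obtain ⟨n, hn, rfl⟩ := mem_enumerate.mp hp
  obtain ⟨n', hn', rfl⟩ := mem_enumerate.mp hq
  simp only at h
  have : (n : Int) = (n' : Int) := by omega
  have : n = n' := by exact_mod_cast this
  subst this
  rfl

-- the triple list B builds before sorting
def rawL (ds ms : List Int) : List (Int × Int × Int) :=
  (PySem.List.enumerate ds).flatMap (fun p => (PySem.List.enumerate ms).map (fun q => (p.2 + q.2, p.1, q.1)))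

lemma mem_rawL {ds ms : List Int} {x : Int × Int × Int} :
    x ∈ rawL ds ms ↔ ∃ i j : Nat, i < ds.length ∧ j < ms.length ∧ x = trip ds ms i j := by
  unfold rawL
  simp only [List.mem_flatMap, List.mem_map, mem_enumerate]
  constructor
  · rintro ⟨p, ⟨i, hi, rfl⟩, q, ⟨j, hj, rfl⟩, rfl⟩
    refine ⟨i, j, hi, hj, ?_⟩
    unfold trip
    simp [hi, hj]
  · rintro ⟨i, j, hi, hj, rfl⟩
    refine ⟨((i : Int), ds[i]), ⟨i, hi, by simp⟩, ((j : Int), ms[j]), ⟨j, hj, by simp⟩, ?_⟩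
    unfold trip
    simp [hi, hj]

lemma nodup_rawL (ds ms : List Int) : (rawL ds ms).Nodup := by
  have he : rawL ds ms
      = ((PySem.List.enumerate ds) ×ˢ (PySem.List.enumerate ms)).map
          (fun pq => (pq.1.2 + pq.2.2, pq.1.1, pq.2.1)) := by
    unfold rawL
    simp only [SProd.sprod, List.product, List.map_flatMap, List.map_map]
    rfl
  rw [he]
  refine List.Nodup.map_on ?_ ((nodup_enumerate ds 0).product (nodup_enumerate ms 0))
  rintro ⟨p1, p2⟩ hx ⟨q1, q2⟩ hy hxy
  simp only [SProd.sprod] at hx hy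
  rw [List.pair_mem_product] at hx hy
  simp only [Prod.mk.injEq] at hxy
  have e1 : p1 = q1 := enumerate_fst_inj hx.1 hy.1 hxy.2.1
  have e2 : p2 = q2 := enumerate_fst_inj hx.2 hy.2 hxy.2.2
  rw [e1, e2]

lemma pairwise_tLt_sorted_rawL (ds ms : List Int) :
    (PySem.List.sorted (rawL ds ms) keyOf).Pairwise tLt := by
  have hle : (PySem.List.sorted (rawL ds ms) keyOf).Pairwise (fun a b => keyOf a ≤ keyOf b) :=
    PySem.List.sorted_pairwise (rawL ds ms) keyOf
  have hnd : (PySem.List.sorted (rawL ds ms) keyOf).Nodup :=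
    (PySem.List.sorted_perm (rawL ds ms) keyOf false).nodup_iff.mpr (nodup_rawL ds ms)
  have hnd' : (PySem.List.sorted (rawL ds ms) keyOf).Pairwise (fun a b => a ≠ b) := hnd
  exact (hle.and hnd').imp fun h =>
    lt_of_le_of_ne h.1 (fun he => h.2 (keyOf_inj he))

lemma mem_sorted_rawL {ds ms : List Int} {x : Int × Int × Int} :
    x ∈ PySem.List.sorted (rawL ds ms) keyOf ↔
      ∃ i j : Nat, i < ds.length ∧ j < ms.length ∧ x = trip ds ms i j := by
  rw [PySem.List.mem_sorted]
  exact mem_rawL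

lemma frontier_pushable {ds ms : List Int} {L : List (Int × Int × Int)}
    (hmd : ∀ a b : Nat, a ≤ b → b < ds.length → ds.getD a 0 ≤ ds.getD b 0)
    (hmm : ∀ a b : Nat, a ≤ b → b < ms.length → ms.getD a 0 ≤ ms.getD b 0)
    (hLs : L.Pairwise tLt)
    (hLm : ∀ x, x ∈ L ↔ ∃ i j : Nat, i < ds.length ∧ j < ms.length ∧ x = trip ds ms i j)
    {t : Nat} (ht : t < L.length) : pushable L t L[t] := by
  obtain ⟨i, j, hi, hj, he⟩ := (hLm L[t]).mp (List.getElem_mem ht)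
  by_cases h0 : i = 0 ∧ j = 0
  · left
    rw [he]
    unfold trip
    simp [h0.1, h0.2]
  · right
    by_cases hi0 : i = 0
    · -- then j ≠ 0: predecessor (i, j-1)
      have hj0 : j ≠ 0 := fun hc => h0 ⟨hi0, hc⟩
      refine ⟨trip ds ms i (j - 1), ?_, ?_⟩
      · refine mem_take_of_tLt hLs ht ((hLm _).mpr ⟨i, j - 1, hi, by omega, rfl⟩) ?_
        rw [he]
        exact tLt_trip hmd hmm (le_refl i) (by omega) (Or.inr (by omega)) hi hj
      · right
        rw [he]
        unfold trip
        exact ⟨rfl, by push_cast; omega⟩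
    · -- predecessor (i-1, j)
      refine ⟨trip ds ms (i - 1) j, ?_, ?_⟩
      · refine mem_take_of_tLt hLs ht ((hLm _).mpr ⟨i - 1, j, by omega, hj, rfl⟩) ?_
        rw [he]
        exact tLt_trip hmd hmm (by omega) (le_refl j) (Or.inl (by omega)) hi hj
      · left
        rw [he]
        unfold trip
        exact ⟨by push_cast; omega, rfl⟩

lemma cast_succ (n : Nat) : ((n : Int) + 1) = ((n + 1 : Nat) : Int) := by push_cast; ring

lemma mem_pushes {rest : List (Int × Int × Int)} {x p1 p2 : Int × Int × Int} {c1 c2 : Prop}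
    [Decidable c1] [Decidable c2] :
    x ∈ (if c2 then hpush (if c1 then hpush rest p1 else rest) p2
         else (if c1 then hpush rest p1 else rest)) ↔
      (x ∈ rest ∨ (c1 ∧ x = p1) ∨ (c2 ∧ x = p2)) := by
  split_ifs with h2 h1 h1 <;> simp [mem_hpush] <;> tauto

lemma pairwise_pushes {rest : List (Int × Int × Int)} {p1 p2 : Int × Int × Int} {c1 c2 : Prop}
    [Decidable c1] [Decidable c2] (h : rest.Pairwise hLe) :
    (if c2 then hpush (if c1 then hpush rest p1 else rest) p2
     else (if c1 then hpush rest p1 else rest)).Pairwise hLe := by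
  split_ifs <;> first
    | exact pairwise_hpush (pairwise_hpush h)
    | exact pairwise_hpush h
    | exact h

lemma loop_eq_scan (ds ms : List Int) (k : Int) (L : List (Int × Int × Int))
    (hmd : ∀ a b : Nat, a ≤ b → b < ds.length → ds.getD a 0 ≤ ds.getD b 0)
    (hmm : ∀ a b : Nat, a ≤ b → b < ms.length → ms.getD a 0 ≤ ms.getD b 0)
    (hLs : L.Pairwise tLt)
    (hLm : ∀ x, x ∈ L ↔ ∃ i j : Nat, i < ds.length ∧ j < ms.length ∧ x = trip ds ms i j) :
    ∀ (N t : Nat) (H : List (Int × Int × Int)) (ans : List (List Int)),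
      (H.map (wt (ds.length : Int) (ms.length : Int))).sum ≤ N →
      t ≤ L.length →
      H.Pairwise hLe →
      (∀ x ∈ H, x ∈ L.drop t ∨ (0 < t ∧ L[t - 1]? = some x)) →
      (∀ c ∈ L.drop t, pushable L t c → c ∈ H) →
      (0 < t → ∃ c, L[t - 1]? = some c ∧ ans ≠ [] ∧ ans.getLast? = some (pairOf ds ms c)) →
      loopA ds ms k N H ans (ans.length : Int) = scanB ds ms k (L.drop t) ans := by
  intro N
  induction N with
  | zero =>
    intro t H ans hsum ht hHp hC2 hC3 hC4
    cases H with
    | cons cur rest =>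
      exfalso
      have hpos : 0 < wt (ds.length : Int) (ms.length : Int) cur := Nat.pow_pos (by norm_num)
      simp only [List.map_cons, List.sum_cons] at hsum
      omega
    | nil =>
      have hdrop : L.drop t = [] := by
        by_contra hne
        have ht' : t < L.length := by
          rcases Nat.lt_or_ge t L.length with h | h
          · exact h
          · exact absurd (List.drop_eq_nil_iff.mpr h) hne
        have hmem : L[t] ∈ L.drop t := by
          rw [List.drop_eq_getElem_cons ht']; exact List.mem_cons_self
        have := hC3 L[t] hmem (frontier_pushable hmd hmm hLs hLm ht')
        simp at this
      rw [hdrop]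
      simp [loopA, scanB]
  | succ N ih =>
    intro t H ans hsum ht hHp hC2 hC3 hC4
    cases H with
    | nil =>
      have hdrop : L.drop t = [] := by
        by_contra hne
        have ht' : t < L.length := by
          rcases Nat.lt_or_ge t L.length with h | h
          · exact h
          · exact absurd (List.drop_eq_nil_iff.mpr h) hne
        have hmem : L[t] ∈ L.drop t := by
          rw [List.drop_eq_getElem_cons ht']; exact List.mem_cons_self
        have := hC3 L[t] hmem (frontier_pushable hmd hmm hLs hLm ht')
        simp at this
      rw [hdrop]
      simp [loopA, scanB]
    | cons cur rest =>
      by_cases hk : (ans.length : Int) < k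
      case neg =>
        rw [loopA]
        simp only [hk, if_false]
        cases hd : L.drop t with
        | nil => simp [scanB]
        | cons c cs =>
          rw [scanB]
          simp only [ge_iff_le, if_pos (by omega : k ≤ (ans.length : Int))]
      case pos =>
        -- measure decrease for the new heap
        have hdec := step_measure (ds.length : Int) (ms.length : Int) cur rest
          (PySem.List.pyGetD ds (cur.2.1 + 1) 0 + PySem.List.pyGetD ms cur.2.2 0)
          (PySem.List.pyGetD ds cur.2.1 0 + PySem.List.pyGetD ms (cur.2.2 + 1) 0)
        have hsum' : (((if cur.2.2 < (ms.length : Int) - 1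
            then hpush (if cur.2.1 < (ds.length : Int) - 1 then hpush rest (PySem.List.pyGetD ds (cur.2.1 + 1) 0 + PySem.List.pyGetD ms cur.2.2 0, cur.2.1 + 1, cur.2.2) else rest)
                  (PySem.List.pyGetD ds cur.2.1 0 + PySem.List.pyGetD ms (cur.2.2 + 1) 0, cur.2.1, cur.2.2 + 1)
            else (if cur.2.1 < (ds.length : Int) - 1 then hpush rest (PySem.List.pyGetD ds (cur.2.1 + 1) 0 + PySem.List.pyGetD ms cur.2.2 0, cur.2.1 + 1, cur.2.2) else rest)).map
              (wt (ds.length : Int) (ms.length : Int))).sum) ≤ N := by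
          omega
        have hrestp : rest.Pairwise hLe := (List.pairwise_cons.mp hHp).2
        have hheadle : ∀ z ∈ rest, hLe cur z := (List.pairwise_cons.mp hHp).1
        rcases hC2 cur List.mem_cons_self with hcdrop | ⟨ht0, hsome⟩
        · -- NEW case: cur is the next unseen triple L[t]
          have ht' : t < L.length := by
            rcases Nat.lt_or_ge t L.length with h | h
            · exact h
            · rw [List.drop_eq_nil_iff.mpr h] at hcdrop; simp at hcdrop
          have hcureq : cur = L[t] := by
            rcases eq_or_tLt_of_mem_drop hLs ht' hcdrop with h | h
            · exact h
            · exfalso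
              have hfr : L[t] ∈ cur :: rest := hC3 L[t]
                (by rw [List.drop_eq_getElem_cons ht']; exact List.mem_cons_self)
                (frontier_pushable hmd hmm hLs hLm ht')
              rcases List.mem_cons.mp hfr with he | hmemr
              · exact tLt_irrefl _ (he ▸ h)
              · rcases hheadle _ hmemr with hlt | he
                · exact tLt_asymm h hlt
                · exact tLt_irrefl _ (he ▸ h)
          obtain ⟨i', j', hi', hj', htrip⟩ := (hLm cur).mp (List.drop_subset t L hcdrop)
          have hc21 : cur.2.1 = (i' : Int) := by rw [htrip]; rfl
          have hc22 : cur.2.2 = (j' : Int) := by rw [htrip]; rfl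
          have hp1eq : (PySem.List.pyGetD ds (cur.2.1 + 1) 0 + PySem.List.pyGetD ms cur.2.2 0, cur.2.1 + 1, cur.2.2)
              = trip ds ms (i' + 1) j' := by
            rw [hc21, hc22, cast_succ, PySem.List.pyGetD_natCast, PySem.List.pyGetD_natCast]; rfl
          have hp2eq : (PySem.List.pyGetD ds cur.2.1 0 + PySem.List.pyGetD ms (cur.2.2 + 1) 0, cur.2.1, cur.2.2 + 1)
              = trip ds ms i' (j' + 1) := by
            rw [hc21, hc22, cast_succ, PySem.List.pyGetD_natCast, PySem.List.pyGetD_natCast]; rfl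
          have hg1 : (cur.2.1 < (ds.length : Int) - 1) ↔ i' + 1 < ds.length := by
            rw [hc21]; constructor <;> intro <;> omega
          have hg2 : (cur.2.2 < (ms.length : Int) - 1) ↔ j' + 1 < ms.length := by
            rw [hc22]; constructor <;> intro <;> omega
          have htake : L.take (t + 1) = L.take t ++ [L[t]] := by
            rw [List.take_succ]
            simp [List.getElem?_eq_getElem ht']
          -- the new-heap invariants, at t+1
          have hnext : ∀ ans' : List (List Int),
              (0 < t + 1 → ∃ c, L[t + 1 - 1]? = some c ∧ ans' ≠ [] ∧ ans'.getLast? = some (pairOf ds ms c)) →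
              loopA ds ms k N
                (if cur.2.2 < (ms.length : Int) - 1
                  then hpush (if cur.2.1 < (ds.length : Int) - 1 then hpush rest (PySem.List.pyGetD ds (cur.2.1 + 1) 0 + PySem.List.pyGetD ms cur.2.2 0, cur.2.1 + 1, cur.2.2) else rest)
                        (PySem.List.pyGetD ds cur.2.1 0 + PySem.List.pyGetD ms (cur.2.2 + 1) 0, cur.2.1, cur.2.2 + 1)
                  else (if cur.2.1 < (ds.length : Int) - 1 then hpush rest (PySem.List.pyGetD ds (cur.2.1 + 1) 0 + PySem.List.pyGetD ms cur.2.2 0, cur.2.1 + 1, cur.2.2) else rest))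
                ans' (ans'.length : Int) = scanB ds ms k (L.drop (t + 1)) ans' := by
            intro ans' hans'
            apply ih (t + 1) _ ans' hsum' (by omega) (pairwise_pushes hrestp)
            · -- condition 2 at t+1
              intro x hx
              rcases mem_pushes.mp hx with hxr | ⟨hc1, rfl⟩ | ⟨hc2, rfl⟩
              · -- x from the old heap tail
                rcases hC2 x (List.mem_cons_of_mem _ hxr) with hxd | ⟨ht0, hsome⟩
                · rw [List.drop_eq_getElem_cons ht'] at hxd
                  rcases List.mem_cons.mp hxd with rfl | hxd'
                  · exact Or.inr ⟨by omega, by simp [List.getElem?_eq_getElem ht']⟩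
                  · exact Or.inl hxd'
                · -- copies of the previous pop cannot still be in the tail here
                  exfalso
                  obtain ⟨ht1, hxeq⟩ := List.getElem?_eq_some_iff.mp hsome
                  have hlt : tLt L[t - 1] L[t] :=
                    List.pairwise_iff_getElem.mp hLs (t - 1) t ht1 ht' (by omega)
                  rcases hheadle x hxr with hlt' | he
                  · exact tLt_asymm hlt (hxeq ▸ hcureq ▸ hlt')
                  · exact tLt_irrefl _ (hxeq ▸ he ▸ hcureq ▸ hlt)
              · rw [hp1eq]
                refine Or.inl (mem_drop_succ_of_tLt hLs ht' ?_ ?_)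
                · exact (hLm _).mpr ⟨i' + 1, j', hg1.mp hc1, hj', rfl⟩
                · rw [← hcureq, htrip]
                  exact tLt_trip hmd hmm (by omega) le_rfl (Or.inl (by omega)) (hg1.mp hc1) hj'
              · rw [hp2eq]
                refine Or.inl (mem_drop_succ_of_tLt hLs ht' ?_ ?_)
                · exact (hLm _).mpr ⟨i', j' + 1, hi', hg2.mp hc2, rfl⟩
                · rw [← hcureq, htrip]
                  exact tLt_trip hmd hmm le_rfl (by omega) (Or.inr (by omega)) hi' (hg2.mp hc2)
            · -- condition 3 at t+1
              intro c hc hpu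
              have hcL : c ∈ L := List.drop_subset _ L hc
              obtain ⟨ic, jc, hic, hjc, hceq⟩ := (hLm c).mp hcL
              have hcne : c ≠ cur := by
                intro he
                exact not_mem_take_drop hLs (htake ▸ List.mem_append_right _ (by
                  simp [← hcureq, ← he])) hc
              rcases hpu with ⟨hz1, hz2⟩ | ⟨p, hp, hsucc⟩
              · -- (0,0) is L's first triple: it cannot still be unseen at t+1
                exfalso
                have hic0 : ic = 0 := by
                  have : (ic : Int) = 0 := by rw [hceq] at hz1; exact hz1
                  exact_mod_cast this
                have hjc0 : jc = 0 := by
                  have : (jc : Int) = 0 := by rw [hceq] at hz2; exact hz2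
                  exact_mod_cast this
                have hc00 : c = trip ds ms 0 0 := by rw [hceq, hic0, hjc0]
                obtain ⟨a, ha, haeq⟩ := List.mem_drop_iff_getElem.mp hc
                have hlt : tLt L[0] c := by
                  rw [← haeq]
                  exact List.pairwise_iff_getElem.mp hLs 0 (t + 1 + a) (by omega) (by omega) (by omega)
                obtain ⟨i0, j0, hi0, hj0, h0eq⟩ := (hLm L[0]).mp (List.getElem_mem (by omega))
                by_cases h00 : i0 = 0 ∧ j0 = 0
                · refine tLt_irrefl (trip ds ms 0 0) ?_
                  rw [h0eq, h00.1, h00.2, hc00] at hlt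
                  exact hlt
                · have hlt2 : tLt (trip ds ms 0 0) L[0] := by
                    rw [h0eq]
                    exact tLt_trip hmd hmm (Nat.zero_le _) (Nat.zero_le _)
                      (by rcases Decidable.not_and_iff_or_not.mp h00 with h | h
                          · exact Or.inl (fun he => h he.symm)
                          · exact Or.inr (fun he => h he.symm)) hi0 hj0
                  exact tLt_asymm hlt (hc00 ▸ hlt2)
              · rw [htake] at hp
                rcases List.mem_append.mp hp with hpold | hpnew
                · -- predecessor already popped before t: c was already in the heap
                  have hcH : c ∈ cur :: rest := hC3 c
                    (by rw [List.drop_eq_getElem_cons ht']; exact List.mem_cons_of_mem _ hc)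
                    (Or.inr ⟨p, hpold, hsucc⟩)
                  rcases List.mem_cons.mp hcH with he | hcr
                  · exact absurd he hcne
                  · exact mem_pushes.mpr (Or.inl hcr)
                · -- predecessor is cur itself: c is one of the two fresh pushes
                  have hpc : p = cur := (List.mem_singleton.mp hpnew).trans hcureq.symm
                  rw [hpc] at hsucc
                  rcases hsucc with ⟨hsa, hsb⟩ | ⟨hsa, hsb⟩
                  · rw [hceq, htrip] at hsa hsb
                    dsimp only [trip] at hsa hsb
                    have hice1 : ic = i' + 1 := by omega
                    have hice2 : jc = j' := by omega
                    refine mem_pushes.mpr (Or.inr (Or.inl ⟨hg1.mpr (hice1 ▸ hic), ?_⟩))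
                    rw [hp1eq, hceq, hice1, hice2]
                  · rw [hceq, htrip] at hsa hsb
                    dsimp only [trip] at hsa hsb
                    have hice1 : ic = i' := by omega
                    have hice2 : jc = j' + 1 := by omega
                    refine mem_pushes.mpr (Or.inr (Or.inr ⟨hg2.mpr (hice2 ▸ hjc), ?_⟩))
                    rw [hp2eq, hceq, hice1, hice2]
            · exact hans'
          -- now do the A-step and B-step and branch on the dedup test
          rw [loopA]
          simp only [hk, if_true]
          conv_rhs => rw [List.drop_eq_getElem_cons ht', ← hcureq]
          rw [scanB]
          simp only [ge_iff_le, if_neg (by omega : ¬ k ≤ (ans.length : Int))]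
          by_cases hded : ans ≠ [] ∧ ans.getLast? = some (pairOf ds ms cur)
          · -- repeated pair: neither side appends
            have hdedA : ans.length > 0 ∧ ans.getLast? = some [PySem.List.pyGetD ds cur.2.1 0, PySem.List.pyGetD ms cur.2.2 0] :=
              ⟨List.length_pos_of_ne_nil hded.1, hded.2⟩
            have hdedB : ¬ (ans = [] ∨ ¬ ans.getLast? = some [PySem.List.pyGetD ds cur.2.1 0, PySem.List.pyGetD ms cur.2.2 0]) := by
              rintro (h | h)
              · exact hded.1 h
              · exact h hded.2
            rw [if_pos hdedA, if_neg hdedB]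
            refine hnext ans (fun _ => ⟨cur, by simp [← hcureq, List.getElem?_eq_getElem ht'], hded.1, hded.2⟩)
          · -- fresh pair: both sides append it
            have hdedA : ¬ (ans.length > 0 ∧ ans.getLast? = some [PySem.List.pyGetD ds cur.2.1 0, PySem.List.pyGetD ms cur.2.2 0]) := by
              rintro ⟨h1, h2⟩
              exact hded ⟨List.ne_nil_of_length_pos h1, h2⟩
            have hdedB : (ans = [] ∨ ¬ ans.getLast? = some [PySem.List.pyGetD ds cur.2.1 0, PySem.List.pyGetD ms cur.2.2 0]) := by
              by_cases he : ans = []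
              · exact Or.inl he
              · refine Or.inr (fun h => hded ⟨he, h⟩)
            rw [if_neg hdedA, if_pos hdedB]
            rw [show ((ans.length : Int) + 1) = (((ans ++ [[PySem.List.pyGetD ds cur.2.1 0, PySem.List.pyGetD ms cur.2.2 0]]).length : Int)) from by simp]
            refine hnext _ (fun _ => ⟨cur, by simp [← hcureq, List.getElem?_eq_getElem ht'], by simp, by rw [List.getLast?_concat]; rfl⟩)
        · -- DUP case: cur is another copy of the most recently popped triple
          obtain ⟨ht1, hcur⟩ := List.getElem?_eq_some_iff.mp hsome
          have hcurL : cur ∈ L := hcur ▸ List.getElem_mem ht1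
          obtain ⟨i', j', hi', hj', htrip⟩ := (hLm cur).mp hcurL
          obtain ⟨c0, hc0some, hansne, hanslast⟩ := hC4 ht0
          have hc0 : c0 = cur := by
            rw [hsome] at hc0some
            exact (Option.some_inj.mp hc0some).symm
          rw [hc0] at hanslast
          rw [loopA]
          simp only [hk, if_true]
          have hdedA : ans.length > 0 ∧ ans.getLast? = some [PySem.List.pyGetD ds cur.2.1 0, PySem.List.pyGetD ms cur.2.2 0] :=
            ⟨List.length_pos_of_ne_nil hansne, hanslast⟩
          simp only [hdedA, and_self, if_true]
          apply ih t _ ans hsum' ht (pairwise_pushes hrestp)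
          · -- condition 2 unchanged
            intro x hx
            have hc21 : cur.2.1 = (i' : Int) := by rw [htrip]; rfl
            have hc22 : cur.2.2 = (j' : Int) := by rw [htrip]; rfl
            have hp1eq : (PySem.List.pyGetD ds (cur.2.1 + 1) 0 + PySem.List.pyGetD ms cur.2.2 0, cur.2.1 + 1, cur.2.2)
                = trip ds ms (i' + 1) j' := by
              rw [hc21, hc22, cast_succ, PySem.List.pyGetD_natCast, PySem.List.pyGetD_natCast]; rfl
            have hp2eq : (PySem.List.pyGetD ds cur.2.1 0 + PySem.List.pyGetD ms (cur.2.2 + 1) 0, cur.2.1, cur.2.2 + 1)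
                = trip ds ms i' (j' + 1) := by
              rw [hc21, hc22, cast_succ, PySem.List.pyGetD_natCast, PySem.List.pyGetD_natCast]; rfl
            rcases mem_pushes.mp hx with hxr | ⟨hc1, rfl⟩ | ⟨hc2, rfl⟩
            · exact hC2 x (List.mem_cons_of_mem _ hxr)
            · rw [hp1eq]
              refine Or.inl ?_
              have : tLt L[t - 1] (trip ds ms (i' + 1) j') := by
                rw [hcur, htrip]
                exact tLt_trip hmd hmm (by omega) le_rfl (Or.inl (by omega))
                  (by rw [hc21] at hc1; omega) hj'
              have hmem := mem_drop_succ_of_tLt hLs ht1 ((hLm _).mpr ⟨i' + 1, j', by rw [hc21] at hc1; omega, hj', rfl⟩) this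
              rw [show t - 1 + 1 = t by omega] at hmem
              exact hmem
            · rw [hp2eq]
              refine Or.inl ?_
              have : tLt L[t - 1] (trip ds ms i' (j' + 1)) := by
                rw [hcur, htrip]
                exact tLt_trip hmd hmm le_rfl (by omega) (Or.inr (by omega))
                  hi' (by rw [hc22] at hc2; omega)
              have hmem := mem_drop_succ_of_tLt hLs ht1 ((hLm _).mpr ⟨i', j' + 1, hi', by rw [hc22] at hc2; omega, rfl⟩) this
              rw [show t - 1 + 1 = t by omega] at hmem
              exact hmem
          · -- condition 3 unchanged
            intro c hc hpu
            have hcne : c ≠ cur := by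
              intro he
              have hmemtake : cur ∈ L.take t :=
                List.mem_take_iff_getElem.mpr ⟨t - 1, by omega, hcur⟩
              exact not_mem_take_drop hLs hmemtake (he ▸ hc)
            rcases List.mem_cons.mp (hC3 c hc hpu) with he | hcr
            · exact absurd he hcne
            · exact mem_pushes.mpr (Or.inl hcr)
          · exact fun _ => ⟨cur, hsome, hansne, hanslast⟩

-- ===== VERDICT (by name: the statement is the Claim_ definition above) =====
theorem k_cheap_flights_spec : Claim_equal_k_cheap_flights := by
  intro d m k _hdom hpre
  obtain ⟨hd, hm⟩ := hpre
  unfold Spec_k_cheap_flights k_cheap_flights k_cheap_flights_alt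
  set ds := PySem.List.sorted d (fun x => x) with hdsdef
  set ms := PySem.List.sorted m (fun x => x) with hmsdef
  change loopA ds ms k (3 ^ (ds.length + ms.length)) [(PySem.List.pyGetD ds 0 0 + PySem.List.pyGetD ms 0 0, 0, 0)] [] 0
      = scanB ds ms k (PySem.List.sorted (rawL ds ms) keyOf) []
  have hmd := mono_getD (PySem.List.sorted_pairwise d (fun x => x))
  have hmm := mono_getD (PySem.List.sorted_pairwise m (fun x => x))
  have hdsne : ds ≠ [] := fun h => hd ((PySem.List.sorted_eq_nil_iff d _ false).mp h)
  have hmsne : ms ≠ [] := fun h => hm ((PySem.List.sorted_eq_nil_iff m _ false).mp h)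
  have hdlen : 0 < ds.length := List.length_pos_of_ne_nil hdsne
  have hmlen : 0 < ms.length := List.length_pos_of_ne_nil hmsne
  have hLs := pairwise_tLt_sorted_rawL ds ms
  have hLm : ∀ x, x ∈ PySem.List.sorted (rawL ds ms) keyOf ↔
      ∃ i j : Nat, i < ds.length ∧ j < ms.length ∧ x = trip ds ms i j := fun x => mem_sorted_rawL
  have heq : (PySem.List.pyGetD ds 0 0 + PySem.List.pyGetD ms 0 0, (0 : Int), (0 : Int)) = trip ds ms 0 0 := by
    simp [trip, PySem.List.pyGetD_zero]
  rw [heq]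
  have hmain := loop_eq_scan ds ms k (PySem.List.sorted (rawL ds ms) keyOf) hmd hmm hLs hLm
    (3 ^ (ds.length + ms.length)) 0 [trip ds ms 0 0] []
    (by
      simp only [List.map_cons, List.map_nil, List.sum_cons, List.sum_nil, Nat.add_zero, wt, trip]
      exact Nat.pow_le_pow_right (by norm_num) (by omega))
    (Nat.zero_le _) (List.pairwise_singleton _ _)
    (by
      intro x hx
      left
      rw [List.drop_zero]
      rw [List.mem_singleton.mp hx]
      exact hLm _ |>.mpr ⟨0, 0, hdlen, hmlen, rfl⟩)
    (by
      intro c hc hp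
      rcases hp with ⟨h1, h2⟩ | ⟨p, hp', _⟩
      · rw [List.drop_zero] at hc
        obtain ⟨ic, jc, hic, hjc, hceq⟩ := (hLm c).mp hc
        have hic0 : ic = 0 := by
          have : (ic : Int) = 0 := by rw [hceq] at h1; exact h1
          exact_mod_cast this
        have hjc0 : jc = 0 := by
          have : (jc : Int) = 0 := by rw [hceq] at h2; exact h2
          exact_mod_cast this
        rw [hceq, hic0, hjc0]
        exact List.mem_singleton.mpr rfl
      · simp at hp')
    (by intro h; omega)
  rw [List.drop_zero] at hmain
  exact hmain
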